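-- pv_equiv track=rewrite | github.com/Moksil/BOJ | TimeOver_2981_Inspection.py | get_divisor_lst
-- ===== SOURCE A (Python) =====
-- import math
--
-- def get_divisor_lst(num):
-- 	divisor_lst = []
-- 	limit = int(math.sqrt(num)) + 1
-- 	for i in range(2, limit):
-- 		if num % i == 0:
-- 			divisor_lst.append(i)
-- 			divisor_lst.append(num // i)
-- 	divisor_lst.sort()
-- 	return divisor_lst
-- ===== SOURCE B (Python) =====
-- def get_divisor_lst(num):
--     # prime factorization of num
--     factors = []
--     m = num
--     p = 2
--     while p * p <= m:
--         if m % p == 0: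
--             e = 0
--             while m % p == 0:
--                 m //= p
--                 e += 1
--             factors.append((p, e))
--         p += 1
--     if m > 1:
--         factors.append((m, 1))
--     # generate all divisors multiplicatively
--     divs = [1]
--     for q, e in factors:
--         divs = [d * q ** k for d in divs for k in range(e + 1)]
--     return sorted(d for d in divs if 1 < d < num)
-- ===== Notes on version B (the rewrite author's own statement) =====
-- stated objective: alternative
-- what changed: Instead of trial-dividing num by every candidate up to its square root and sorting the collected divisor/cofactor pairs, B computes the prime factorization of num, generates all divisors multiplicatively as products of prime powers, and returns the sorted nontrivial ones.
-- intended difference: On perfect squares num >= 4 A returns the divisor list with sqrt(num) listed twice (it appends both the small divisor and its cofactor even when they are equal), while B lists every nontrivial divisor exactly once, which is the intended divisor list. — e.g. on get_divisor_lst(4): A returns [2, 2], B returns [2]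
import Mathlib
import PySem

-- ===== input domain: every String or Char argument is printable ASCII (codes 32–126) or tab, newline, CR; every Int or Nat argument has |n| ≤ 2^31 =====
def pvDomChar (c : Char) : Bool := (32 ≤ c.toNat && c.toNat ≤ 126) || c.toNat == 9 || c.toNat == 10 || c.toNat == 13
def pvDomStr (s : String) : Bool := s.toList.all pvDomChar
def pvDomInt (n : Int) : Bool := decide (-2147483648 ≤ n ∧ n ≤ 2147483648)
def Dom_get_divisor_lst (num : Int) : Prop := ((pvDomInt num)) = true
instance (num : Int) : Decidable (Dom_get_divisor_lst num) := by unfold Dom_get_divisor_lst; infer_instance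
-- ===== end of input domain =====

-- B replaces A's trial-division pairing loop plus sort by prime factorization followed by
-- multiplicative divisor generation; on perfect squares ≥ 4 (D_ below) B intentionally
-- lists sqrt(num) once where A lists it twice.

-- ===== PORT A =====
def get_divisor_lst (num : Int) : List Int :=
  let limit : Int := Int.sqrt num + 1
  let divisor_lst :=
    (PySem.List.pyRange 2 limit 1).foldl
      (fun acc i =>
        if PySem.Int.mod num i = 0 then
          acc ++ [i] ++ [PySem.Int.floordiv num i]
        else acc) []
  PySem.List.sorted divisor_lst (fun x => x) false

-- ===== PORT B =====
-- termination helper for the ports' loops (cited in decreasing_by)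
theorem pv_floordiv_toNat_lt (m p : Int) (hm : 1 ≤ m) (hp : 2 ≤ p) :
    (PySem.Int.floordiv m p).toNat < m.toNat := by
  rw [PySem.Int.floordiv_eq_ediv_of_pos (by omega : (0:Int) < p)]
  have h1 : 0 ≤ m / p := Int.ediv_nonneg (by omega) (by omega)
  have h2 : m / p < m := by
    by_contra hc
    push_neg at hc
    nlinarith [Int.ediv_add_emod m p, Int.emod_nonneg m (show p ≠ 0 by omega)]
  omega

-- inner while of B's factorization: divide out p, counting (returns (m', e))
def pvExtract (m p : Int) : Int × Int :=
  if h : 1 ≤ m ∧ 2 ≤ p ∧ PySem.Int.mod m p = 0 then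
    let r := pvExtract (PySem.Int.floordiv m p) p
    (r.1, r.2 + 1)
  else (m, 0)
termination_by m.toNat
decreasing_by exact pv_floordiv_toNat_lt m p h.1 h.2.1

-- the extracted remainder never grows (cited in pvFact's decreasing_by)
theorem pv_extract_fst_le (n : Nat) : ∀ m p : Int, m.toNat ≤ n → (pvExtract m p).1 ≤ m := by
  induction n with
  | zero =>
    intro m p hm
    unfold pvExtract
    split
    · rename_i h; exfalso; omega
    · exact le_refl m
  | succ k ih =>
    intro m p hm
    unfold pvExtract
    split
    · rename_i h
      have hlt := pv_floordiv_toNat_lt m p h.1 h.2.1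
      have h0 : 0 ≤ PySem.Int.floordiv m p := by
        rw [PySem.Int.floordiv_eq_ediv_of_pos (by omega : (0:Int) < p)]
        exact Int.ediv_nonneg (by omega) (by omega)
      have hrec := ih (PySem.Int.floordiv m p) p (by omega)
      show (pvExtract (PySem.Int.floordiv m p) p).1 ≤ m
      omega
    · exact le_refl m

-- outer while of B's factorization: list of (prime, exponent) pairs
def pvFact (m p : Int) : List (Int × Int) :=
  if h : 2 ≤ p ∧ p * p ≤ m then
    if PySem.Int.mod m p = 0 then
      let r := pvExtract m p
      (p, r.2) :: pvFact r.1 (p + 1)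
    else pvFact m (p + 1)
  else if 1 < m then [(m, 1)] else []
termination_by (m + 1 - p).toNat
decreasing_by
  · have h1 := pv_extract_fst_le m.toNat m p le_rfl
    have : p ≤ m := by nlinarith [h.1, h.2]
    omega
  · have : p ≤ m := by nlinarith [h.1, h.2]
    omega

-- one step of B's divisor generation: divs = [d * q ** k for d in divs for k in range(e + 1)]
def pvStep (divs : List Int) (qe : Int × Int) : List Int :=
  divs.flatMap (fun d => (PySem.List.pyRange 0 (qe.2 + 1) 1).map (fun k => d * qe.1 ^ k.toNat))

def get_divisor_lst_alt (num : Int) : List Int :=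
  let factors := pvFact num 2
  let divs := factors.foldl pvStep [1]
  PySem.List.sorted (divs.filter (fun d => decide (1 < d ∧ d < num))) (fun x => x) false

-- ===== PRECONDITION & SPEC =====
-- math.sqrt raises ValueError on negative input, so Pre_ requires num to be nonnegative
-- (for num < 0, A raises and B returns []).
def Pre_get_divisor_lst (num : Int) : Prop := 0 ≤ num
instance (num : Int) : Decidable (Pre_get_divisor_lst num) := by unfold Pre_get_divisor_lst; infer_instance
def pvWitness_get_divisor_lst : Int := 30

-- On perfect squares num ≥ 4 A returns the divisor list with sqrt(num) listed twice (it
-- appends both i and num//i even when they are equal), while B lists every nontrivial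
-- divisor exactly once, which is the intended divisor list.
def D_get_divisor_lst (num : Int) : Prop := 4 ≤ num ∧ Int.sqrt num * Int.sqrt num = num
instance (num : Int) : Decidable (D_get_divisor_lst num) := by unfold D_get_divisor_lst; infer_instance

def Spec_get_divisor_lst (num : Int) (out : List Int) : Prop := ¬ D_get_divisor_lst num → out = get_divisor_lst_alt num
instance (num : Int) (out : List Int) : Decidable (Spec_get_divisor_lst num out) := by unfold Spec_get_divisor_lst; infer_instance

def pvDiffWitness_get_divisor_lst : Int := 4
def pvDiffWitnessOut_get_divisor_lst : (List Int) × (List Int) := ([2, 2], [2])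

-- ===== CLAIM (what is proved, stated in full; the proofs are below) =====
def Claim_unchanged_get_divisor_lst : Prop := ∀ (num : Int), Dom_get_divisor_lst num → Pre_get_divisor_lst num → Spec_get_divisor_lst num (get_divisor_lst num)
def Claim_changed_get_divisor_lst : Prop := Dom_get_divisor_lst (pvDiffWitness_get_divisor_lst) ∧ Pre_get_divisor_lst (pvDiffWitness_get_divisor_lst) ∧ D_get_divisor_lst (pvDiffWitness_get_divisor_lst) ∧ get_divisor_lst (pvDiffWitness_get_divisor_lst) = pvDiffWitnessOut_get_divisor_lst.1 ∧ get_divisor_lst_alt (pvDiffWitness_get_divisor_lst) = pvDiffWitnessOut_get_divisor_lst.2 ∧ pvDiffWitnessOut_get_divisor_lst.1 ≠ pvDiffWitnessOut_get_divisor_lst.2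
def Claim_exact_get_divisor_lst : Prop := ∀ (num : Int), Dom_get_divisor_lst num → Pre_get_divisor_lst num → D_get_divisor_lst num → get_divisor_lst num ≠ get_divisor_lst_alt num

-- ===== LEMMAS AND PROOFS =====

-- the block A appends for one loop index i
def pvBlock (num i : Int) : List Int :=
  if PySem.Int.mod num i = 0 then [i, PySem.Int.floordiv num i] else []

-- the multiset A sorts
def pvM (num : Int) : List Int :=
  (PySem.List.pyRange 2 (Int.sqrt num + 1) 1).flatMap (pvBlock num)

theorem pv_foldlA (num : Int) (L : List Int) (acc : List Int) :
    L.foldl (fun acc i =>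
        if PySem.Int.mod num i = 0 then acc ++ [i] ++ [PySem.Int.floordiv num i] else acc) acc
      = acc ++ L.flatMap (pvBlock num) := by
  induction L generalizing acc with
  | nil => simp
  | cons x t ih =>
    simp only [List.foldl_cons, List.flatMap_cons, ih, pvBlock]
    split_ifs <;> simp

theorem pv_sqrt_bounds (num : Int) (h : 0 ≤ num) :
    Int.sqrt num * Int.sqrt num ≤ num ∧ num < (Int.sqrt num + 1) * (Int.sqrt num + 1) := by
  unfold Int.sqrt
  have h1 : Nat.sqrt num.toNat * Nat.sqrt num.toNat ≤ num.toNat := by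
    have := Nat.sqrt_le' num.toNat; rwa [pow_two] at this
  have h2 : num.toNat < (Nat.sqrt num.toNat + 1) * (Nat.sqrt num.toNat + 1) := by
    have := Nat.lt_succ_sqrt' num.toNat; rwa [Nat.succ_eq_add_one, pow_two] at this
  have h3 : ((num.toNat : Int)) = num := Int.toNat_of_nonneg h
  constructor
  · calc (Nat.sqrt num.toNat : Int) * (Nat.sqrt num.toNat : Int)
        = ((Nat.sqrt num.toNat * Nat.sqrt num.toNat : Nat) : Int) := by push_cast; ring
      _ ≤ ((num.toNat : Nat) : Int) := by exact_mod_cast h1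
      _ = num := h3
  · calc num = ((num.toNat : Nat) : Int) := h3.symm
      _ < ((Nat.sqrt num.toNat + 1) * (Nat.sqrt num.toNat + 1) : Nat) := by exact_mod_cast h2
      _ = ((Nat.sqrt num.toNat : Int) + 1) * ((Nat.sqrt num.toNat : Int) + 1) := by push_cast; ring

-- membership in A's multiset = "nontrivial divisor" (any num ≥ 0; multiplicity may differ)
theorem pv_mem (num x : Int) (h : 0 ≤ num) :
    x ∈ pvM num ↔ (2 ≤ x ∧ x < PySem.Int.floordiv num 2 + 1 ∧ PySem.Int.mod num x = 0) := by
  obtain ⟨hs1, hs2⟩ := pv_sqrt_bounds num h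
  have hs0 : 0 ≤ Int.sqrt num := Int.sqrt_nonneg num
  have hhalf : ∀ y : Int, y < PySem.Int.floordiv num 2 + 1 ↔ y * 2 ≤ num := by
    intro y
    rw [Int.lt_add_one_iff, PySem.Int.le_floordiv_iff_mul_le (by norm_num : (0:Int) < 2)]
  constructor
  · intro hx
    rw [pvM, List.mem_flatMap] at hx
    obtain ⟨i, hi, hxi⟩ := hx
    rw [PySem.List.mem_pyRange_one] at hi
    obtain ⟨hi2, hiS⟩ := hi
    rw [Int.lt_add_one_iff] at hiS
    unfold pvBlock at hxi
    by_cases hdvd : PySem.Int.mod num i = 0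
    · rw [if_pos hdvd] at hxi
      have hdvd' : i ∣ num := (PySem.Int.mod_eq_zero_iff_dvd num i).1 hdvd
      obtain ⟨d, hd⟩ := hdvd'
      have hfd : PySem.Int.floordiv num i = d := by
        rw [PySem.Int.floordiv_eq_ediv_of_pos (by omega : (0:Int) < i), hd,
          Int.mul_ediv_cancel_left d (by omega : i ≠ 0)]
      have hd0 : 0 ≤ d := by nlinarith
      have hd2 : 2 ≤ d := by nlinarith
      simp only [List.mem_cons, List.not_mem_nil, or_false] at hxi
      rcases hxi with rfl | rfl
      · refine ⟨hi2, (hhalf x).2 (by nlinarith), hdvd⟩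
      · rw [hfd]
        refine ⟨hd2, (hhalf d).2 (by nlinarith), ?_⟩
        rw [PySem.Int.mod_eq_zero_iff_dvd]
        exact ⟨i, by linarith [hd, mul_comm i d]⟩
    · rw [if_neg hdvd] at hxi; simp at hxi
  · rintro ⟨hx2, hxH, hxdvd⟩
    rw [hhalf x] at hxH
    have hdvd' : x ∣ num := (PySem.Int.mod_eq_zero_iff_dvd num x).1 hxdvd
    obtain ⟨d, hd⟩ := hdvd'
    have hd2 : 2 ≤ d := by nlinarith
    rw [pvM, List.mem_flatMap]
    by_cases hxs : x ≤ Int.sqrt num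
    · refine ⟨x, ?_, ?_⟩
      · rw [PySem.List.mem_pyRange_one]; omega
      · unfold pvBlock; rw [if_pos hxdvd]; exact List.mem_cons_self
    · have hds : d ≤ Int.sqrt num := by nlinarith
      have hmd : PySem.Int.mod num d = 0 := by
        rw [PySem.Int.mod_eq_zero_iff_dvd]
        exact ⟨x, by linarith [hd, mul_comm x d]⟩
      refine ⟨d, ?_, ?_⟩
      · rw [PySem.List.mem_pyRange_one]; omega
      · unfold pvBlock
        rw [if_pos hmd]
        have : PySem.Int.floordiv num d = x := by
          rw [PySem.Int.floordiv_eq_ediv_of_pos (by omega : (0:Int) < d), hd, mul_comm x d,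
            Int.mul_ediv_cancel_left x (by omega : d ≠ 0)]
        rw [this]
        simp

theorem pv_nodup (num : Int) (h : 0 ≤ num) (hnd : ¬ D_get_divisor_lst num) :
    (pvM num).Nodup := by
  obtain ⟨hs1, hs2⟩ := pv_sqrt_bounds num h
  have hs0 : 0 ≤ Int.sqrt num := Int.sqrt_nonneg num
  rw [pvM, List.nodup_flatMap]
  constructor
  · intro i hi
    rw [PySem.List.mem_pyRange_one, Int.lt_add_one_iff] at hi
    unfold pvBlock
    split_ifs with hm
    · have : i ∣ num := (PySem.Int.mod_eq_zero_iff_dvd num i).1 hm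
      obtain ⟨d, hd⟩ := this
      have hfd : PySem.Int.floordiv num i = d := by
        rw [PySem.Int.floordiv_eq_ediv_of_pos (by omega : (0:Int) < i), hd,
          Int.mul_ediv_cancel_left d (by omega : i ≠ 0)]
      rw [hfd]
      simp only [List.nodup_cons, List.mem_singleton, List.not_mem_nil, not_false_iff,
        List.nodup_nil, and_true]
      intro hieq
      -- i = d would make num = i*i a perfect square with sqrt ≥ 2, i.e. D_
      apply hnd
      have hii : i * i = num := by rw [hd, ← hieq]
      have hsq : Int.sqrt num = i := by
        have h4 : i ≤ Int.sqrt num := by nlinarith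
        have h5 : Int.sqrt num ≤ i := by nlinarith
        omega
      exact ⟨by nlinarith, by rw [hsq]; exact hii⟩
    · exact List.nodup_nil
  · have hpw := PySem.List.pairwise_lt_pyRange_one 2 (Int.sqrt num + 1)
    refine hpw.imp_of_mem ?_
    intro i j hi hj hij
    rw [PySem.List.mem_pyRange_one, Int.lt_add_one_iff] at hi hj
    intro a ha hb
    unfold pvBlock at ha hb
    split_ifs at ha hb with hmi hmj
    · obtain ⟨d, hd⟩ := (PySem.Int.mod_eq_zero_iff_dvd num i).1 hmi
      obtain ⟨e, he⟩ := (PySem.Int.mod_eq_zero_iff_dvd num j).1 hmj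
      have hfd : PySem.Int.floordiv num i = d := by
        rw [PySem.Int.floordiv_eq_ediv_of_pos (by omega : (0:Int) < i), hd,
          Int.mul_ediv_cancel_left d (by omega : i ≠ 0)]
      have hfe : PySem.Int.floordiv num j = e := by
        rw [PySem.Int.floordiv_eq_ediv_of_pos (by omega : (0:Int) < j), he,
          Int.mul_ediv_cancel_left e (by omega : j ≠ 0)]
      rw [hfd] at ha
      rw [hfe] at hb
      have hd0 : 0 ≤ d := by nlinarith
      have he0 : 0 ≤ e := by nlinarith
      -- the large cofactors sit at or above sqrt num
      have hdge : Int.sqrt num ≤ d := by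
        nlinarith [hd, mul_le_mul_of_nonneg_right hi.2 hd0]
      have hege : Int.sqrt num ≤ e := by
        nlinarith [he, mul_le_mul_of_nonneg_right hj.2 he0]
      simp only [List.mem_cons, List.not_mem_nil, or_false] at ha hb
      rcases ha with ha | ha <;> rcases hb with hb | hb
      · -- a = i and a = j
        omega
      · -- a = i and a = e: but e ≥ sqrt ≥ j > i
        omega
      · -- a = d and a = j: then num = i*j < j*j ≤ sqrt² ≤ num
        have hdj : d = j := by omega
        have h1 : num = i * j := by rw [hd, hdj]
        nlinarith [h1, mul_lt_mul_of_pos_right hij (show (0:Int) < j by omega),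
          mul_le_mul_of_nonneg_right hj.2 (show (0:Int) ≤ j by omega)]
      · -- a = d and a = e: i*d = j*e with d = e forces i = j
        have hde : d = e := by omega
        have h1 : i * d = j * d := by
          calc i * d = num := hd.symm
            _ = j * e := he
            _ = j * d := by rw [hde]
        have : i = j := mul_right_cancel₀ (show d ≠ 0 by omega) h1
        omega
    · simp at hb
    · simp at ha
    · simp at ha

theorem pv_A_eq_sorted_M (num : Int) :
    get_divisor_lst num = PySem.List.sorted (pvM num) (fun x => x) false := by
  rw [get_divisor_lst]
  simp only [pv_foldlA, List.nil_append]
  rfl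

-- ---- B-side: correctness of factorization + divisor generation ----

def pvExpand (L : List (Int × Int)) : List Int := L.foldl pvStep [1]

theorem pv_B_eq (num : Int) :
    get_divisor_lst_alt num
      = PySem.List.sorted
          ((pvExpand (pvFact num 2)).filter (fun d => decide (1 < d ∧ d < num)))
          (fun x => x) false := rfl

-- the fold over a seed is the seed times the fold over [1]
theorem pv_expand_seed (L : List (Int × Int)) (seed : List Int) :
    L.foldl pvStep seed = seed.flatMap (fun a => (pvExpand L).map (fun b => a * b)) := by
  induction L generalizing seed with
  | nil =>
    simp [pvExpand, List.flatMap_singleton']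
  | cons qe L ih =>
    have hE : pvExpand (qe :: L)
        = (pvStep [1] qe).flatMap (fun a => (pvExpand L).map (fun b => a * b)) := by
      rw [pvExpand, List.foldl_cons]
      exact ih (pvStep [1] qe)
    rw [List.foldl_cons, ih (pvStep seed qe)]
    simp only [hE]
    simp only [pvStep, List.flatMap_assoc, List.flatMap_map, List.map_flatMap, List.map_map]
    apply List.flatMap_congr
    intro d _
    simp only [List.flatMap_cons, List.flatMap_nil, List.append_nil, one_mul]
    apply List.flatMap_congr
    intro k _
    apply List.map_congr_left
    intro b _
    show d * qe.1 ^ k.toNat * b = d * (qe.1 ^ k.toNat * b)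
    ring

-- pvExtract splits off the full power of p
theorem pv_extract_spec (n : Nat) : ∀ m p : Int, m.toNat ≤ n → 1 ≤ m → 2 ≤ p →
    1 ≤ (pvExtract m p).1 ∧ 0 ≤ (pvExtract m p).2 ∧
      m = (pvExtract m p).1 * p ^ (pvExtract m p).2.toNat ∧ ¬ p ∣ (pvExtract m p).1 := by
  induction n with
  | zero => intro m p h0 hm hp; omega
  | succ k ih =>
    intro m p hmn hm hp
    unfold pvExtract
    split
    · rename_i h
      have hdvd : p ∣ m := (PySem.Int.mod_eq_zero_iff_dvd m p).1 h.2.2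
      obtain ⟨c, hc⟩ := hdvd
      have hfdc : PySem.Int.floordiv m p = c := by
        rw [PySem.Int.floordiv_eq_ediv_of_pos (by omega : (0:Int) < p), hc,
          Int.mul_ediv_cancel_left c (by omega : p ≠ 0)]
      have hc1 : 1 ≤ c := by nlinarith
      have hlt := pv_floordiv_toNat_lt m p h.1 h.2.1
      have hrec := ih (PySem.Int.floordiv m p) p (by omega) (by rw [hfdc]; exact hc1) hp
      show 1 ≤ (pvExtract (PySem.Int.floordiv m p) p).1 ∧
          0 ≤ (pvExtract (PySem.Int.floordiv m p) p).2 + 1 ∧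
          m = (pvExtract (PySem.Int.floordiv m p) p).1 *
              p ^ ((pvExtract (PySem.Int.floordiv m p) p).2 + 1).toNat ∧
          ¬ p ∣ (pvExtract (PySem.Int.floordiv m p) p).1
      obtain ⟨h1, h2, h3, h4⟩ := hrec
      refine ⟨h1, by omega, ?_, h4⟩
      have htn : ((pvExtract (PySem.Int.floordiv m p) p).2 + 1).toNat
          = (pvExtract (PySem.Int.floordiv m p) p).2.toNat + 1 := by omega
      rw [htn, pow_succ]
      calc m = p * c := hc
        _ = p * (PySem.Int.floordiv m p) := by rw [hfdc]
        _ = p * ((pvExtract (PySem.Int.floordiv m p) p).1 *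
              p ^ (pvExtract (PySem.Int.floordiv m p) p).2.toNat) := by rw [← h3]
        _ = (pvExtract (PySem.Int.floordiv m p) p).1 *
              (p ^ (pvExtract (PySem.Int.floordiv m p) p).2.toNat * p) := by ring
    · rename_i h
      have hmod : ¬ PySem.Int.mod m p = 0 := fun hmod0 => h ⟨hm, hp, hmod0⟩
      refine ⟨hm, le_refl 0, by simp, fun hdvd => hmod ((PySem.Int.mod_eq_zero_iff_dvd m p).2 hdvd)⟩

-- a divisor of m with no divisor below p is prime once p divides m
theorem pv_prime (p M : Int) (hp2 : 2 ≤ p) (hpm : p ∣ M)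
    (hsmall : ∀ q, 2 ≤ q → q < p → ¬ q ∣ M) : Prime p := by
  rw [Int.prime_iff_natAbs_prime, Nat.prime_def_lt]
  constructor
  · omega
  · intro q hq hqd
    by_contra hne
    have hq0 : q ≠ 0 := by
      intro h0
      rw [h0, zero_dvd_iff] at hqd
      omega
    have hq2 : 2 ≤ q := by omega
    have hqp : (q : Int) ∣ p := by
      rw [Int.natCast_dvd]
      simpa using hqd
    exact hsmall (q : Int) (by exact_mod_cast hq2) (by omega) (hqp.trans hpm)

-- unique splitting of a divisor of m' * p^e along the prime p
theorem pv_split (p : Int) (hp : Prime p) (hp0 : 0 < p) :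
    ∀ (eN : Nat) (m' d : Int), ¬ p ∣ m' → 0 < d → d ∣ m' * p ^ eN →
      ∃ kN : Nat, kN ≤ eN ∧ ∃ d', d' ∣ m' ∧ d = p ^ kN * d' := by
  intro eN
  induction eN with
  | zero =>
    intro m' d hpm hd0 hdvd
    exact ⟨0, le_rfl, d, by simpa using hdvd, by simp⟩
  | succ e ihe =>
    intro m' d hpm hd0 hdvd
    by_cases hpd : p ∣ d
    · obtain ⟨d2, hd2⟩ := hpd
      have hd20 : 0 < d2 := by nlinarith
      have hre : m' * p ^ (e + 1) = p * (m' * p ^ e) := by ring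
      rw [hre, hd2] at hdvd
      have hdvd2 : d2 ∣ m' * p ^ e :=
        (mul_dvd_mul_iff_left (show p ≠ 0 by omega)).1 hdvd
      obtain ⟨kN, hk, d', hd', hEq⟩ := ihe m' d2 hpm hd20 hdvd2
      exact ⟨kN + 1, by omega, d', hd', by rw [hd2, hEq, pow_succ]; ring⟩
    · have hcop : IsCoprime p d := (hp.coprime_iff_not_dvd).2 hpd
      have hcop' : IsCoprime (p ^ (e + 1)) d := hcop.pow_left
      rw [mul_comm] at hdvd
      exact ⟨0, by omega, d, hcop'.symm.dvd_of_dvd_mul_left hdvd, by simp⟩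

-- the stop case of the factorization: m itself is 1 or prime
theorem pv_fact_stop (m p : Int) (hm : 1 ≤ m) (hp : 2 ≤ p)
    (hsm : ∀ q, 2 ≤ q → q < p → ¬ q ∣ m) (hstop : ¬ p * p ≤ m) :
    (pvExpand (pvFact m p)).Nodup ∧ (∀ d, d ∈ pvExpand (pvFact m p) ↔ 0 < d ∧ d ∣ m) := by
  have hfact : pvFact m p = if 1 < m then [(m, 1)] else [] := by
    unfold pvFact
    rw [dif_neg (by tauto)]
  by_cases h1 : 1 < m
  · rw [hfact, if_pos h1]
    have hE : pvExpand [(m, 1)] = [1, m] := by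
      show pvStep [1] (m, 1) = [1, m]
      rw [pvStep, show ((1:Int) + 1) = 2 from by norm_num,
        show PySem.List.pyRange 0 2 1 = [0, 1] from by decide]
      norm_num
    rw [hE]
    constructor
    · simp only [List.nodup_cons, List.mem_singleton, List.not_mem_nil, not_false_iff,
        List.nodup_nil, and_true]
      omega
    · intro d
      simp only [List.mem_cons, List.not_mem_nil, or_false]
      constructor
      · rintro (rfl | ha)
        · exact ⟨one_pos, one_dvd m⟩
        · rw [ha]
          exact ⟨by omega, dvd_refl m⟩
      · rintro ⟨hd0, c, hc⟩
        by_contra hne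
        push_neg at hne
        have hdle : d ≤ m := Int.le_of_dvd (by omega) ⟨c, hc⟩
        have hd2 : 2 ≤ d := by omega
        have hc1 : 1 ≤ c := by nlinarith
        have hc2 : 2 ≤ c := by
          rcases eq_or_lt_of_le hc1 with hceq | _
          · exfalso; apply hne.2; rw [hc, ← hceq, mul_one]
          · omega
        rcases le_total d c with hdc | hdc
        · have hdd : d * d ≤ m := by nlinarith
          have hdp : d < p := by nlinarith
          exact hsm d hd2 hdp ⟨c, hc⟩
        · have hcc : c * c ≤ m := by nlinarith
          have hcp : c < p := by nlinarith
          exact hsm c hc2 hcp ⟨d, by rw [hc]; ring⟩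
  · have hm1 : m = 1 := by omega
    subst hm1
    rw [hfact, if_neg h1]
    constructor
    · show List.Nodup [1]; simp
    · intro d
      show d ∈ [1] ↔ _
      simp only [List.mem_singleton]
      constructor
      · rintro rfl; exact ⟨one_pos, dvd_refl 1⟩
      · rintro ⟨hd0, hdvd⟩
        have := Int.le_of_dvd one_pos hdvd
        omega

-- the factorization together with the expansion enumerates each divisor once
theorem pv_fact_spec (n : Nat) : ∀ m p : Int, (m + 1 - p).toNat ≤ n → 1 ≤ m → 2 ≤ p →
    (∀ q, 2 ≤ q → q < p → ¬ q ∣ m) →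
    (pvExpand (pvFact m p)).Nodup ∧ (∀ d, d ∈ pvExpand (pvFact m p) ↔ 0 < d ∧ d ∣ m) := by
  induction n with
  | zero =>
    intro m p hb hm hp hsm
    refine pv_fact_stop m p hm hp hsm ?_
    intro hle
    have h1 : m < p := by omega
    nlinarith
  | succ n ihn =>
    intro m p hb hm hp hsm
    by_cases hle : p * p ≤ m
    · have hpm : p ≤ m := by nlinarith
      by_cases hmod : PySem.Int.mod m p = 0
      · -- divide out the full power of p
        obtain ⟨hm'1, he0, hmeq, hpm'⟩ := pv_extract_spec m.toNat m p le_rfl hm hp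
        have hfacteq : pvFact m p = (p, (pvExtract m p).2) :: pvFact (pvExtract m p).1 (p + 1) := by
          rw [pvFact.eq_def, dif_pos ⟨hp, hle⟩, if_pos hmod]
        have hm'le : (pvExtract m p).1 ≤ m := pv_extract_fst_le m.toNat m p le_rfl
        have hsm' : ∀ q, 2 ≤ q → q < p + 1 → ¬ q ∣ (pvExtract m p).1 := by
          intro q hq2 hqp hqdvd
          by_cases hqp' : q < p
          · exact hsm q hq2 hqp' (hqdvd.trans ⟨p ^ (pvExtract m p).2.toNat, hmeq⟩)
          · have : q = p := by omega
            subst this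
            exact hpm' hqdvd
        obtain ⟨hN', hMem'⟩ := ihn (pvExtract m p).1 (p + 1) (by omega) hm'1 (by omega) hsm'
        have hprime : Prime p := pv_prime p m hp ((PySem.Int.mod_eq_zero_iff_dvd m p).1 hmod) hsm
        have hEx : pvExpand (pvFact m p)
            = (PySem.List.pyRange 0 ((pvExtract m p).2 + 1) 1).flatMap
                (fun k => (pvExpand (pvFact (pvExtract m p).1 (p + 1))).map
                  (fun b => 1 * p ^ k.toNat * b)) := by
          rw [hfacteq]
          show List.foldl pvStep (pvStep [1] (p, (pvExtract m p).2)) _ = _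
          rw [pv_expand_seed]
          rw [pvStep]
          simp only [List.flatMap_cons, List.flatMap_nil, List.append_nil, List.flatMap_map]
        constructor
        · rw [hEx, List.nodup_flatMap]
          constructor
          · intro k _
            refine hN'.map ?_
            intro b1 b2 hbe
            have hpk : (1 : Int) * p ^ k.toNat ≠ 0 := by
              have : (0:Int) < p ^ k.toNat := pow_pos (by omega) _
              omega
            exact mul_left_cancel₀ hpk hbe
          · refine (PySem.List.pairwise_lt_pyRange_one 0 ((pvExtract m p).2 + 1)).imp_of_mem ?_
            intro k k' hk hk' hkk'
            rw [PySem.List.mem_pyRange_one] at hk hk'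
            intro a ha ha'
            simp only [List.mem_map] at ha ha'
            obtain ⟨b, hb, hab⟩ := ha
            obtain ⟨b', hb', hab'⟩ := ha'
            have hbm' : b ∣ (pvExtract m p).1 := ((hMem' b).1 hb).2
            have hkN : k.toNat < k'.toNat := by omega
            have hstep : p ^ k'.toNat = p ^ k.toNat * p ^ (k'.toNat - k.toNat) := by
              rw [← pow_add]
              congr 1
              omega
            have hpk : (0:Int) < p ^ k.toNat := pow_pos (by omega) _
            have hbb : b = p ^ (k'.toNat - k.toNat) * b' := by
              have h1 : (1:Int) * p ^ k.toNat * b = 1 * (p ^ k.toNat * (p ^ (k'.toNat - k.toNat) * b')) := by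
                rw [hab, ← hab', hstep]; ring
              have h2 : p ^ k.toNat * b = p ^ k.toNat * (p ^ (k'.toNat - k.toNat) * b') := by
                have := h1; simpa using this
              exact mul_left_cancel₀ (by omega) h2
            have hpb : p ∣ b := by
              rw [hbb]
              exact Dvd.dvd.mul_right (dvd_pow_self p (by omega)) b'
            exact hpm' (hpb.trans hbm')
        · intro d
          rw [hEx, List.mem_flatMap]
          constructor
          · rintro ⟨k, hk, hd⟩
            rw [PySem.List.mem_pyRange_one] at hk
            simp only [List.mem_map] at hd
            obtain ⟨b, hb, rfl⟩ := hd
            obtain ⟨hb0, hbm'⟩ := (hMem' b).1 hb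
            have hkle : k.toNat ≤ (pvExtract m p).2.toNat := by omega
            constructor
            · have : (0:Int) < p ^ k.toNat := pow_pos (by omega) _
              nlinarith
            · rw [hmeq, one_mul, mul_comm ((pvExtract m p).1)]
              exact mul_dvd_mul (pow_dvd_pow p hkle) hbm'
          · rintro ⟨hd0, hddvd⟩
            rw [hmeq] at hddvd
            obtain ⟨kN, hkle, d', hd'm, hdEq⟩ :=
              pv_split p hprime (by omega) (pvExtract m p).2.toNat (pvExtract m p).1 d hpm' hd0 hddvd
            have hd'0 : 0 < d' := by
              have : (0:Int) < p ^ kN := pow_pos (by omega) _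
              nlinarith
            refine ⟨(kN : Int), ?_, ?_⟩
            · rw [PySem.List.mem_pyRange_one]
              omega
            · simp only [List.mem_map]
              exact ⟨d', (hMem' d').2 ⟨hd'0, hd'm⟩, by rw [hdEq]; simp⟩
      · -- p does not divide m: move to p + 1
        have hfacteq : pvFact m p = pvFact m (p + 1) := by
          rw [pvFact.eq_def, dif_pos ⟨hp, hle⟩, if_neg hmod]
        rw [hfacteq]
        refine ihn m (p + 1) (by omega) hm (by omega) ?_
        intro q hq2 hqp hqdvd
        by_cases hqp' : q < p
        · exact hsm q hq2 hqp' hqdvd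
        · have : q = p := by omega
          subst this
          exact hmod ((PySem.Int.mod_eq_zero_iff_dvd m q).2 hqdvd)
    · exact pv_fact_stop m p hm hp hsm hle

-- ===== VERDICT (by name: the statement is the Claim_ definition above) =====
theorem get_divisor_lst_spec : Claim_unchanged_get_divisor_lst := by
  intro num _ hpre hnd
  show get_divisor_lst num = get_divisor_lst_alt num
  rw [pv_A_eq_sorted_M, pv_B_eq]
  rcases eq_or_lt_of_le hpre with h0 | hpos
  · -- num = 0: both sides are sorts of the empty divisor list
    have h0' : num = 0 := h0.symm
    subst h0'
    have hs : Int.sqrt 0 = 0 := by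
      unfold Int.sqrt
      norm_num
    have hM : pvM 0 = [] := by
      rw [pvM, hs, show (0:Int) + 1 = 1 from by norm_num,
        PySem.List.pyRange_one_eq_nil (by norm_num : (1:Int) ≤ 2)]
      rfl
    have hF : pvFact 0 2 = [] := by
      rw [pvFact.eq_def, dif_neg (by norm_num), if_neg (by norm_num)]
    rw [hM, hF]
    decide
  · -- num ≥ 1: both sides sort the same nodup list of nontrivial divisors
    have hm1 : 1 ≤ num := hpos
    obtain ⟨hNod, hMem⟩ := pv_fact_spec (num + 1 - 2).toNat num 2 le_rfl hm1 (by norm_num)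
      (fun q hq2 hqlt => absurd hqlt (by omega))
    apply PySem.List.sorted_eq_sorted_of_perm _ _ _ (fun a b h => h)
    rw [List.perm_ext_iff_of_nodup (pv_nodup num hpre hnd) (hNod.filter _)]
    intro a
    rw [pv_mem num a hpre, List.mem_filter]
    simp only [decide_eq_true_eq]
    constructor
    · rintro ⟨ha2, haH, hamod⟩
      have hadvd : a ∣ num := (PySem.Int.mod_eq_zero_iff_dvd num a).1 hamod
      rw [Int.lt_add_one_iff, PySem.Int.le_floordiv_iff_mul_le (by norm_num : (0:Int) < 2)] at haH
      exact ⟨(hMem a).2 ⟨by omega, hadvd⟩, by omega, by omega⟩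
    · rintro ⟨haE, ha1, hanum⟩
      obtain ⟨ha0, hadvd⟩ := (hMem a).1 haE
      obtain ⟨c, hc⟩ := hadvd
      have hc2 : 2 ≤ c := by
        have hc1 : 1 ≤ c := by nlinarith
        rcases eq_or_lt_of_le hc1 with hceq | _
        · exfalso
          rw [hc, ← hceq, mul_one] at hanum
          exact lt_irrefl a hanum
        · omega
      refine ⟨by omega, ?_, (PySem.Int.mod_eq_zero_iff_dvd num a).2 ⟨c, hc⟩⟩
      rw [Int.lt_add_one_iff, PySem.Int.le_floordiv_iff_mul_le (by norm_num : (0:Int) < 2)]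
      nlinarith

theorem get_divisor_lst_changed : Claim_changed_get_divisor_lst := by
  unfold Claim_changed_get_divisor_lst
  have hsq : Int.sqrt 4 = 2 := by
    unfold Int.sqrt
    rw [show ((4:Int).toNat) = 2 * 2 from rfl, Nat.sqrt_eq]
    rfl
  refine ⟨by decide, by decide, ⟨by decide, ?_⟩, ?_, ?_, by decide⟩
  · show Int.sqrt 4 * Int.sqrt 4 = 4
    rw [hsq]
    norm_num
  · show get_divisor_lst 4 = [2, 2]
    unfold get_divisor_lst
    rw [hsq]
    decide
  · show get_divisor_lst_alt 4 = [2]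
    have e1 : pvExtract 1 2 = (1, 0) := by
      rw [pvExtract.eq_def, dif_neg (by decide)]
    have e2 : pvExtract 2 2 = (1, 1) := by
      rw [pvExtract.eq_def, dif_pos (by decide),
        show PySem.Int.floordiv 2 2 = 1 from by decide, e1]
      decide
    have e3 : pvExtract 4 2 = (1, 2) := by
      rw [pvExtract.eq_def, dif_pos (by decide),
        show PySem.Int.floordiv 4 2 = 2 from by decide, e2]
      decide
    have f1 : pvFact 1 3 = [] := by
      rw [pvFact.eq_def, dif_neg (by decide), if_neg (by decide)]
    have f2 : pvFact 4 2 = [(2, 2)] := by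
      rw [pvFact.eq_def, dif_pos (by decide), if_pos (by decide), e3]
      show ((2:Int), (2:Int)) :: pvFact 1 3 = [(2, 2)]
      rw [f1]
    rw [pv_B_eq, f2]
    decide

theorem get_divisor_lst_tight : Claim_exact_get_divisor_lst := by
  intro num _ hpre hD heq
  obtain ⟨h4, hsq⟩ := hD
  set s := Int.sqrt num with hsdef
  have hs0 : 0 ≤ s := Int.sqrt_nonneg num
  have hs2 : 2 ≤ s := by nlinarith [hsq, h4, hs0]
  -- A's list contains sqrt num at least twice
  have hsplit : PySem.List.pyRange 2 (s + 1) 1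
      = PySem.List.pyRange 2 s 1 ++ [s] :=
    PySem.List.pyRange_one_succ_right (by omega)
  have hmod : PySem.Int.mod num s = 0 := by
    rw [PySem.Int.mod_eq_zero_iff_dvd]
    exact ⟨s, hsq.symm⟩
  have hfd : PySem.Int.floordiv num s = s := by
    rw [PySem.Int.floordiv_eq_ediv_of_pos (by omega : (0:Int) < s), ← hsq,
      Int.mul_ediv_cancel_left s (by omega : s ≠ 0)]
  have hcountA : 2 ≤ (get_divisor_lst num).count s := by
    rw [pv_A_eq_sorted_M, (PySem.List.sorted_perm _ _ _).count_eq, pvM, hsplit,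
      List.flatMap_append, List.count_append]
    have : (List.flatMap (pvBlock num) [s]).count s = 2 := by
      simp [pvBlock, hmod, hfd]
    omega
  -- B's list is duplicate-free
  have hNod := (pv_fact_spec (num + 1 - 2).toNat num 2 le_rfl (by omega) (by norm_num)
    (fun q hq2 hqlt => absurd hqlt (by omega))).1
  have hcountB : (get_divisor_lst_alt num).count s ≤ 1 := by
    rw [pv_B_eq, (PySem.List.sorted_perm _ _ _).count_eq]
    exact List.nodup_iff_count_le_one.1 (hNod.filter _) s
  rw [heq] at hcountA
  omega
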